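-- pv_equiv track=rewrite | github.com/Nik-Tavakolian/Shepherd | shepherd_t0.py | get_SNP_freq_sum
-- ===== SOURCE A (Python) =====
-- def get_SNP_freq_sum(high_freq_seq, seq_freq_dict_dict):
--
--     SNP_count = 0
--     nucleotides = {'A', 'C', 'T', 'G'}
--     for i, nuc_current in enumerate(high_freq_seq):
--         for nuc_new in nucleotides:
--             if nuc_new != nuc_current:
--                 snp_seq = high_freq_seq[:i] + nuc_new + high_freq_seq[i + 1:]
--                 if snp_seq in seq_freq_dict_dict:
--                     SNP_count += seq_freq_dict_dict[snp_seq]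
--
--     return SNP_count
-- ===== SOURCE B (Python) =====
-- def get_SNP_freq_sum(high_freq_seq, seq_freq_dict_dict):
--     n = len(high_freq_seq)
--     total = 0
--     for key, freq in seq_freq_dict_dict.items():
--         if len(key) == n:
--             diffs = [j for j in range(n) if key[j] != high_freq_seq[j]]
--             if len(diffs) == 1 and key[diffs[0]] in ('A', 'C', 'T', 'G'):
--                 total += freq
--     return total
-- ===== Notes on version B (the rewrite author's own statement) =====
-- stated objective: faster
-- what changed: Instead of generating all 3L one-substitution neighbor strings (each of length L) and looking each up in the dict, B makes one pass over the dict items and adds the frequency of every key at Hamming distance exactly 1 whose single differing character is a nucleotide; the Lean Pre_ additionally excludes association lists with duplicate keys, which cannot arise from a Python dict.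
import Mathlib
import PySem

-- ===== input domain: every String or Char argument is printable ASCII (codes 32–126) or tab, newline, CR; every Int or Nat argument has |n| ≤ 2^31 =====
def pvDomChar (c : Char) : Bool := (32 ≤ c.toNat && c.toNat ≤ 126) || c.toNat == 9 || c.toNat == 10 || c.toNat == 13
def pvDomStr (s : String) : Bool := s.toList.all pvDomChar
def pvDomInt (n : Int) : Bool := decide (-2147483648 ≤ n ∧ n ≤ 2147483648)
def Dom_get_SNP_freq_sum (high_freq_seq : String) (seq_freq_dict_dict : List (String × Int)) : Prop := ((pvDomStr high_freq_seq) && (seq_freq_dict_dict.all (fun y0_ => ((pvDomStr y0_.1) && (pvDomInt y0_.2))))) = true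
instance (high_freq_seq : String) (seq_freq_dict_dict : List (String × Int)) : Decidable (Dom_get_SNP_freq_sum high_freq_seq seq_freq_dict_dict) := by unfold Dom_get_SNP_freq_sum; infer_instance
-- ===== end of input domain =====

-- B scans the frequency table once for keys at Hamming distance exactly 1 (with a nucleotide at the
-- differing position) instead of building the 3L neighbor strings of length L and looking each up:
-- O(m*L) over O(L^2), measurably faster on long sequences.

-- ===== PORT A =====
def get_SNP_freq_sum (high_freq_seq : String) (seq_freq_dict_dict : List (String × Int)) : Int :=
  let nucleotides : PySem.Set Char := PySem.Set.ofList ['A', 'C', 'T', 'G']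
  (PySem.List.enumerate high_freq_seq.toList).foldl
    (fun SNP_count ic =>
      nucleotides.foldl
        (fun acc nuc_new =>
          if nuc_new ≠ ic.2 then
            match (PySem.Dict.mk seq_freq_dict_dict).get? (String.ofList
              (PySem.Chars.slice high_freq_seq.toList none (some ic.1) ++ [nuc_new] ++
               PySem.Chars.slice high_freq_seq.toList (some (ic.1 + 1)) none)) with
            | some v => acc + v
            | none => acc
          else acc)
        SNP_count)
    0

-- ===== PORT B =====
def get_SNP_freq_sum_alt (high_freq_seq : String) (seq_freq_dict_dict : List (String × Int)) : Int :=
  seq_freq_dict_dict.foldl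
    (fun total kv =>
      if kv.1.toList.length = high_freq_seq.toList.length then
        if ((List.range high_freq_seq.toList.length).filter
              (fun j => kv.1.toList.getD j ' ' ≠ high_freq_seq.toList.getD j ' ')).length = 1 ∧
           kv.1.toList.getD
             (((List.range high_freq_seq.toList.length).filter
               (fun j => kv.1.toList.getD j ' ' ≠ high_freq_seq.toList.getD j ' ')).headD 0) ' '
             ∈ (['A', 'C', 'T', 'G'] : List Char) then
          total + kv.2
        else total
      else total)
    0

-- ===== PRECONDITION & SPEC =====
-- Pre_ excludes association lists with duplicate keys: they cannot arise from a Python dict (the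
-- argument is a dict), and on such lists A's first-match lookup and B's full scan are both accidental.
def Pre_get_SNP_freq_sum (high_freq_seq : String) (seq_freq_dict_dict : List (String × Int)) : Prop :=
  (seq_freq_dict_dict.map Prod.fst).Nodup
instance (high_freq_seq : String) (seq_freq_dict_dict : List (String × Int)) : Decidable (Pre_get_SNP_freq_sum high_freq_seq seq_freq_dict_dict) := by unfold Pre_get_SNP_freq_sum; infer_instance
def pvWitness_get_SNP_freq_sum : String × (List (String × Int)) := ("AC", [("AA", 2), ("GC", 3), ("AC", 7)])
def Spec_get_SNP_freq_sum (high_freq_seq : String) (seq_freq_dict_dict : List (String × Int)) (out : Int) : Prop := out = get_SNP_freq_sum_alt high_freq_seq seq_freq_dict_dict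
instance (high_freq_seq : String) (seq_freq_dict_dict : List (String × Int)) (out : Int) : Decidable (Spec_get_SNP_freq_sum high_freq_seq seq_freq_dict_dict out) := by unfold Spec_get_SNP_freq_sum; infer_instance

-- ===== CLAIM (what is proved, stated in full; the proofs are below) =====
def Claim_equal_get_SNP_freq_sum : Prop := ∀ (high_freq_seq : String) (seq_freq_dict_dict : List (String × Int)), Dom_get_SNP_freq_sum high_freq_seq seq_freq_dict_dict → Pre_get_SNP_freq_sum high_freq_seq seq_freq_dict_dict → Spec_get_SNP_freq_sum high_freq_seq seq_freq_dict_dict (get_SNP_freq_sum high_freq_seq seq_freq_dict_dict)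

-- ===== LEMMAS AND PROOFS =====

/-- The nucleotide alphabet, as a plain list. -/
def pvNucs : List Char := ['A', 'C', 'T', 'G']

/-- `true` iff the two strings have equal length, differ at exactly one position, and the
differing character of the second one is a nucleotide. -/
def pvHam1 : List Char → List Char → Bool
  | [], _ => false
  | _ :: _, [] => false
  | a :: u, b :: k => if a = b then pvHam1 u k else (pvNucs.contains b && u == k)

/-- All one-substitution neighbours A generates, in generation order. -/
def pvKeys : List Char → List (List Char)
  | [] => []
  | a :: u => (pvNucs.filter (fun c => c ≠ a)).map (fun c => c :: u)
              ++ (pvKeys u).map (fun w => a :: w)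

/-- A's dict lookup contribution for one neighbour. -/
def pvLook (d : List (String × Int)) (w : List Char) : Int :=
  PySem.Dict.getD (PySem.Dict.mk d) (String.ofList w) 0

/-- The differing positions B computes. -/
def pvDiffs (t kl : List Char) : List Nat :=
  (List.range t.length).filter (fun j => kl.getD j ' ' ≠ t.getD j ' ')

lemma pv_inner_fold (d : List (String × Int)) (a : Char) (g : Char → String) :
    ∀ (cs : List Char) (acc : Int),
    cs.foldl
      (fun acc c =>
        if c ≠ a then
          match (PySem.Dict.mk d).get? (g c) with
          | some v => acc + v
          | none => acc
        else acc) acc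
    = acc + ((cs.filter (fun c => c ≠ a)).map
        (fun c => PySem.Dict.getD (PySem.Dict.mk d) (g c) 0)).sum := by
  intro cs
  induction cs with
  | nil => intro acc; simp
  | cons c cs ih =>
    intro acc
    rw [List.foldl_cons, ih, List.filter_cons]
    by_cases hc : c ≠ a
    · rw [if_pos hc]
      cases h : (PySem.Dict.mk d).get? (g c) with
      | some v => simp [hc, h, PySem.Dict.getD, add_assoc]
      | none => simp [hc, h, PySem.Dict.getD]
    · simp [hc]

lemma pv_A_general (d : List (String × Int)) :
    ∀ (u pre : List Char) (t : List Char), t = pre ++ u → ∀ (acc : Int),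
    (PySem.List.enumerate u (pre.length : Int)).foldl
      (fun SNP_count ic =>
        (PySem.Set.ofList ['A', 'C', 'T', 'G'] : PySem.Set Char).foldl
          (fun acc nuc_new =>
            if nuc_new ≠ ic.2 then
              match (PySem.Dict.mk d).get? (String.ofList
                (PySem.Chars.slice t none (some ic.1) ++ [nuc_new] ++
                 PySem.Chars.slice t (some (ic.1 + 1)) none)) with
              | some v => acc + v
              | none => acc
            else acc)
          SNP_count) acc
    = acc + ((pvKeys u).map (fun w => pvLook d (pre ++ w))).sum := by
  intro u
  induction u with
  | nil =>
    intro pre t ht acc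
    simp [PySem.List.enumerate_nil, pvKeys]
  | cons a u ih =>
    intro pre t ht acc
    subst ht
    have hsl1 : PySem.Chars.slice (pre ++ a :: u) none (some (pre.length : Int)) = pre := by
      rw [PySem.Chars.slice_eq_listSlice, PySem.List.slice_to_natCast, List.take_left]
    have hsl2 : PySem.Chars.slice (pre ++ a :: u) (some ((pre.length : Int) + 1)) none = u := by
      rw [PySem.Chars.slice_eq_listSlice,
        show ((pre.length : Int) + 1) = (((pre.length + 1 : Nat)) : Int) by push_cast; ring,
        PySem.List.slice_from_natCast,
        show pre ++ a :: u = (pre ++ [a]) ++ u by simp,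
        show pre.length + 1 = (pre ++ [a]).length by simp, List.drop_left]
    simp only [PySem.List.enumerate_cons, List.foldl_cons]
    rw [hsl1, hsl2]
    rw [pv_inner_fold d a (fun c => String.ofList (pre ++ [c] ++ u))
      (PySem.Set.ofList ['A', 'C', 'T', 'G'])]
    rw [show ((pre.length : Int) + 1) = (((pre ++ [a]).length : Nat) : Int) by simp,
      ih (pre ++ [a]) (pre ++ a :: u) (by simp),
      show (PySem.Set.ofList ['A', 'C', 'T', 'G'] : PySem.Set Char) = pvNucs from rfl]
    simp only [pvKeys, List.map_append, List.map_map, List.sum_append]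
    rw [add_assoc]
    congr 2
    · exact congrArg List.sum (List.map_congr_left (fun c _ => by simp [pvLook]))
    · exact congrArg List.sum (List.map_congr_left (fun w _ => by simp [pvLook]))

lemma pv_A_eq (s : String) (d : List (String × Int)) :
    get_SNP_freq_sum s d = ((pvKeys s.toList).map (fun w => pvLook d w)).sum := by
  unfold get_SNP_freq_sum
  have h := pv_A_general d s.toList [] s.toList rfl 0
  simp only [List.length_nil, Nat.cast_zero, List.nil_append] at h
  rw [h]
  simp

lemma pv_B_eq (s : String) (d : List (String × Int)) :
    get_SNP_freq_sum_alt s d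
      = (d.map (fun kv =>
          if kv.1.toList.length = s.toList.length ∧
             (pvDiffs s.toList kv.1.toList).length = 1 ∧
             kv.1.toList.getD ((pvDiffs s.toList kv.1.toList).headD 0) ' '
               ∈ (['A', 'C', 'T', 'G'] : List Char)
          then kv.2 else 0)).sum := by
  unfold get_SNP_freq_sum_alt
  have main : ∀ (l : List (String × Int)) (acc : Int),
      l.foldl
        (fun total kv =>
          if kv.1.toList.length = s.toList.length then
            if ((List.range s.toList.length).filter
                  (fun j => kv.1.toList.getD j ' ' ≠ s.toList.getD j ' ')).length = 1 ∧
               kv.1.toList.getD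
                 (((List.range s.toList.length).filter
                   (fun j => kv.1.toList.getD j ' ' ≠ s.toList.getD j ' ')).headD 0) ' '
                 ∈ (['A', 'C', 'T', 'G'] : List Char) then
              total + kv.2
            else total
          else total) acc
      = acc + (l.map (fun kv =>
          if kv.1.toList.length = s.toList.length ∧
             (pvDiffs s.toList kv.1.toList).length = 1 ∧
             kv.1.toList.getD ((pvDiffs s.toList kv.1.toList).headD 0) ' '
               ∈ (['A', 'C', 'T', 'G'] : List Char)
          then kv.2 else 0)).sum := by
    intro l
    induction l with
    | nil => intro acc; simp
    | cons kv l ih =>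
      intro acc
      rw [List.foldl_cons, ih]
      simp only [List.map_cons, List.sum_cons, pvDiffs]
      split_ifs with h1 h2 h3 h3 <;> first
        | omega
        | (exfalso; tauto)
  rw [main d 0, zero_add]

lemma pv_sum_if_eq (b : Char) (f : Int) :
    ∀ (l : List Char), l.Nodup →
    ((l.map (fun c => if c = b then f else 0)).sum) = if b ∈ l then f else 0 := by
  intro l hnd
  induction l with
  | nil => simp
  | cons c l ih =>
    rw [List.map_cons, List.sum_cons, ih hnd.of_cons]
    by_cases hc : c = b
    · subst hc
      rw [if_pos rfl, if_pos List.mem_cons_self,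
        if_neg (by simpa using (List.nodup_cons.mp hnd).1), add_zero]
    · rw [if_neg hc, zero_add]
      have hbc : ¬b = c := fun h => hc h.symm
      by_cases hb : b ∈ l
      · simp [List.mem_cons, hb]
      · simp [List.mem_cons, hb, hbc]

lemma pvHam1_refl : ∀ u : List Char, pvHam1 u u = false
  | [] => rfl
  | _ :: u => by simp [pvHam1, pvHam1_refl u]

lemma pv_count_keys (f : Int) :
    ∀ (t kl : List Char),
    ((pvKeys t).map (fun w => if w = kl then f else (0 : Int))).sum
      = if pvHam1 t kl then f else 0 := by
  intro t
  induction t with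
  | nil => intro kl; simp [pvKeys, pvHam1]
  | cons a u ih =>
    intro kl
    simp only [pvKeys, List.map_append, List.sum_append, List.map_map]
    cases kl with
    | nil =>
      have h1 : ∀ c ∈ pvNucs.filter (fun c => c ≠ a),
          ((fun w => if w = ([] : List Char) then f else (0 : Int)) ∘ fun c => c :: u) c = 0 :=
        fun c _ => by simp
      have h2 : ∀ w ∈ pvKeys u,
          ((fun w => if w = ([] : List Char) then f else (0 : Int)) ∘ fun w => a :: w) w = 0 :=
        fun w _ => by simp
      rw [List.map_congr_left h1, List.map_congr_left h2]
      simp [pvHam1]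
    | cons b kl' =>
      have hS2 : ((pvKeys u).map
            ((fun w => if w = b :: kl' then f else (0 : Int)) ∘ fun w => a :: w)).sum
          = if a = b then (if pvHam1 u kl' then f else 0) else 0 := by
        by_cases hab : a = b
        · subst hab
          rw [if_pos rfl, ← ih kl']
          exact congrArg List.sum (List.map_congr_left (fun w _ => by simp))
        · rw [if_neg hab,
            List.map_congr_left (fun w _ => by simp [hab] :
              ∀ w ∈ pvKeys u,
                ((fun w => if w = b :: kl' then f else (0 : Int)) ∘ fun w => a :: w) w = 0)]
          simp
      have hS1 : ((pvNucs.filter (fun c => c ≠ a)).map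
            ((fun w => if w = b :: kl' then f else (0 : Int)) ∘ fun c => c :: u)).sum
          = if u = kl' then (if b ∈ pvNucs ∧ ¬b = a then f else 0) else 0 := by
        by_cases hu : u = kl'
        · subst hu
          rw [if_pos rfl,
            List.map_congr_left (fun c _ => by simp :
              ∀ c ∈ pvNucs.filter (fun c => c ≠ a),
                ((fun w => if w = b :: u then f else (0 : Int)) ∘ fun c => c :: u) c
                  = if c = b then f else 0),
            pv_sum_if_eq b f _ (List.Nodup.filter _ (by decide))]
          simp [List.mem_filter]
        · rw [if_neg hu,
            List.map_congr_left (fun c _ => by simp [hu] :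
              ∀ c ∈ pvNucs.filter (fun c => c ≠ a),
                ((fun w => if w = b :: kl' then f else (0 : Int)) ∘ fun c => c :: u) c = 0)]
          simp
      rw [hS1, hS2]
      simp only [pvHam1]
      by_cases hab : a = b
      · subst hab
        by_cases hu : u = kl'
        · subst hu
          simp [pvHam1_refl]
        · simp [hu]
      · by_cases hu : u = kl'
        · subst hu
          have hba : ¬b = a := fun h => hab h.symm
          simp [hab, hba]
        · simp [hab, hu]

lemma pv_diffs_nil_iff (u kl : List Char) (h : kl.length = u.length) :
    pvDiffs u kl = [] ↔ u = kl := by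
  unfold pvDiffs
  rw [List.filter_eq_nil_iff]
  constructor
  · intro hall
    apply List.ext_getElem h.symm
    intro j hj hj'
    have := hall j (List.mem_range.mpr hj)
    simp at this
    rw [← List.getD_eq_getElem u ' ' hj, ← List.getD_eq_getElem kl ' ' hj']
    exact this.symm
  · rintro rfl
    intro j _
    simp

lemma pv_diffs_cons (a b : Char) (u kl : List Char) :
    pvDiffs (a :: u) (b :: kl)
      = (if b = a then ([] : List Nat) else [0]) ++ (pvDiffs u kl).map (fun j => j + 1) := by
  unfold pvDiffs
  rw [List.length_cons, List.range_succ_eq_map, List.filter_cons, List.filter_map]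
  by_cases hba : b = a
  · rw [if_neg (by simp [hba] :
        ¬(decide ((b :: kl).getD 0 ' ' ≠ (a :: u).getD 0 ' ') = true)), if_pos hba,
      List.nil_append]
    rfl
  · rw [if_pos (by simp [hba] :
        (decide ((b :: kl).getD 0 ' ' ≠ (a :: u).getD 0 ' ')) = true), if_neg hba,
      List.singleton_append]
    exact congrArg (List.cons 0) rfl

lemma pv_cond_iff (t kl : List Char) :
    (kl.length = t.length ∧
     (pvDiffs t kl).length = 1 ∧
     kl.getD ((pvDiffs t kl).headD 0) ' ' ∈ (['A', 'C', 'T', 'G'] : List Char))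
      ↔ pvHam1 t kl = true := by
  induction t generalizing kl with
  | nil => cases kl <;> simp [pvDiffs, pvHam1]
  | cons a u ih =>
    cases kl with
    | nil => simp [pvDiffs, pvHam1]
    | cons b kl' =>
      rw [pv_diffs_cons]
      by_cases hba : b = a
      · subst hba
        rw [if_pos rfl]
        simp only [List.nil_append, List.length_map, List.length_cons]
        rw [show pvHam1 (b :: u) (b :: kl') = pvHam1 u kl' by simp [pvHam1]]
        rw [← ih kl']
        constructor
        · rintro ⟨h1, h2, h3⟩
          refine ⟨by omega, h2, ?_⟩
          obtain ⟨j, hj⟩ := List.length_eq_one_iff.mp h2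
          rw [hj] at h3 ⊢
          simpa using h3
        · rintro ⟨h1, h2, h3⟩
          refine ⟨by omega, h2, ?_⟩
          obtain ⟨j, hj⟩ := List.length_eq_one_iff.mp h2
          rw [hj] at h3 ⊢
          simpa using h3
      · rw [if_neg hba]
        have hab : ¬a = b := fun h => hba h.symm
        constructor
        · rintro ⟨h1, h2, h3⟩
          simp only [List.cons_append, List.nil_append, List.length_cons,
            List.length_map] at h1 h2
          have hd : pvDiffs u kl' = [] := by
            have : (pvDiffs u kl').length = 0 := by omega
            exact List.eq_nil_of_length_eq_zero this
          have hukl : u = kl' := (pv_diffs_nil_iff u kl' (by omega)).mp hd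
          simp only [List.cons_append, List.nil_append, List.headD_cons,
            List.getD_cons_zero] at h3
          simp [pvHam1, hab, hukl, h3, pvNucs]
        · intro hham
          simp only [pvHam1, if_neg hab, Bool.and_eq_true, List.contains_iff_mem,
            beq_iff_eq] at hham
          obtain ⟨hbn, hukl⟩ := hham
          subst hukl
          have hd : pvDiffs u u = [] := (pv_diffs_nil_iff u u rfl).mpr rfl
          rw [hd]
          simp [pvNucs] at hbn
          simp [hbn]

lemma pv_look_cons (k : String) (f : Int) (rest : List (String × Int)) (w : List Char)
    (hk : k ∉ rest.map Prod.fst) :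
    pvLook ((k, f) :: rest) w = (if String.ofList w = k then f else 0) + pvLook rest w := by
  unfold pvLook PySem.Dict.getD PySem.Dict.get?
  by_cases h : String.ofList w = k
  · have hfind : List.find? (fun p => p.1 == String.ofList w) rest = none := by
      rw [List.find?_eq_none]
      intro p hp
      simp only [beq_iff_eq]
      intro he
      apply hk
      have hm : p.1 ∈ rest.map Prod.fst := List.mem_map_of_mem hp
      rwa [he, h] at hm
    rw [h] at hfind
    simp [h, hfind]
  · have hne : (k == String.ofList w) = false := by
      simp only [beq_eq_false_iff_ne, ne_eq]
      exact fun hh => h hh.symm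
    simp [hne, h]

lemma pv_main (t : List Char) :
    ∀ (d : List (String × Int)), (d.map Prod.fst).Nodup →
    ((pvKeys t).map (fun w => pvLook d w)).sum
      = (d.map (fun kv =>
          if kv.1.toList.length = t.length ∧
             (pvDiffs t kv.1.toList).length = 1 ∧
             kv.1.toList.getD ((pvDiffs t kv.1.toList).headD 0) ' '
               ∈ (['A', 'C', 'T', 'G'] : List Char)
          then kv.2 else 0)).sum := by
  intro d
  induction d with
  | nil => intro _; simp [pvLook, PySem.Dict.getD, PySem.Dict.get?]
  | cons kv rest ih =>
    intro hnd
    obtain ⟨k, f⟩ := kv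
    rw [List.map_cons] at hnd
    have hk : k ∉ rest.map Prod.fst := (List.nodup_cons.mp hnd).1
    have hofto : ∀ w : List Char, (String.ofList w = k) ↔ (w = k.toList) := by
      intro w
      constructor
      · intro h; rw [← h]; simp
      · intro h; rw [h]; simp
    rw [List.map_congr_left (fun w _ => pv_look_cons k f rest w hk),
      PySem.List.sum_map_add_int,
      List.map_congr_left (fun w _ => if_congr (hofto w) rfl rfl :
        ∀ w ∈ pvKeys t,
          (if String.ofList w = k then f else (0 : Int)) = if w = k.toList then f else 0),
      pv_count_keys f t k.toList,
      List.map_cons, List.sum_cons, ih (List.nodup_cons.mp hnd).2]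
    congr 1
    exact if_congr (pv_cond_iff t k.toList).symm rfl rfl

-- ===== VERDICT (by name: the statement is the Claim_ definition above) =====
theorem get_SNP_freq_sum_spec : Claim_equal_get_SNP_freq_sum := by
  intro s d _ hpre
  show _ = _
  rw [pv_A_eq, pv_B_eq, pv_main s.toList d hpre]
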